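-- pv_equiv track=rewrite | github.com/Commandershadow9/shadowops-bot | src/utils/changelog_parser.py | _parse_subsections
-- ===== SOURCE A (Python) =====
-- from typing import Optional, Dict, List
--
-- def _parse_subsections(content: str) -> List[Dict[str, str]]:
--     """Parse subsections (### headers) from content."""
--     subsections = []
--     lines = content.split('\n')
--     current_section = None
--     current_content = []
--
--     for line in lines:
--         if line.startswith('### '):
--             # Save previous section
--             if current_section:
--                 subsections.append({
--                     'title': current_section,
--                     'content': '\n'.join(current_content).strip()
--                 })
--
--             # Start new section
--             current_section = line[4:].strip()
--             current_content = []
--         elif current_section: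
--             current_content.append(line)
--
--     # Save last section
--     if current_section:
--         subsections.append({
--             'title': current_section,
--             'content': '\n'.join(current_content).strip()
--         })
--
--     return subsections
-- ===== SOURCE B (Python) =====
-- def _parse_subsections(content):
--     """Parse subsections (### headers) from content (single reverse scan)."""
--     result = []
--     body = []
--     for line in reversed(content.split('\n')):
--         if line.startswith('### '):
--             title = line[4:].strip()
--             if title:
--                 result.append({
--                     'title': title,
--                     'content': '\n'.join(reversed(body)).strip()
--                 })
--             body = []
--         else:
--             body.append(line)
--     result.reverse()
--     return result
-- ===== Notes on version B (the rewrite author's own statement) =====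
-- stated objective: alternative
-- what changed: B scans the lines in reverse, accumulating pending body lines and emitting each section back-to-front when its header is met, eliminating A's optional current-section state and the duplicated save-section epilogue.
import Mathlib
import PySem

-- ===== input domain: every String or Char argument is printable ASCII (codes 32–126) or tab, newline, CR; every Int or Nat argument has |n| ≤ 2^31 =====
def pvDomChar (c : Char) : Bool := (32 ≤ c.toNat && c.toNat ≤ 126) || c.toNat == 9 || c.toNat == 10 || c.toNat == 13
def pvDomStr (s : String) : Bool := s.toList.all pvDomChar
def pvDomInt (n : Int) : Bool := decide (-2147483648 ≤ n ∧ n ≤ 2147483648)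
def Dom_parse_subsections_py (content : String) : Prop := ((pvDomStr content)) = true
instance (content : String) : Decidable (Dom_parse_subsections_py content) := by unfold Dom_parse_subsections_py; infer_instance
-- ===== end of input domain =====

-- B replaces A's forward scan with optional current-section state and a save-last-section
-- epilogue by a single reverse scan that emits each section when its header line is reached
-- (alternative decomposition, same cost).

-- ===== PORT A =====
-- loop body of A: state (subsections, current_section, current_content);
-- Python's 'if current_section:' is 'some s with s ≠ ""' (None and "" are falsy).
def pvStepA (st : List (List (String × String)) × Option String × List String) (line : String) :
    List (List (String × String)) × Option String × List String :=
  if PySem.Str.startswith line "### " then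
    ((match st.2.1 with
      | some s =>
        if s ≠ "" then
          st.1 ++ [[("title", s), ("content", PySem.Str.strip (PySem.Str.join "\n" st.2.2))]]
        else st.1
      | none => st.1),
     some (PySem.Str.strip (PySem.Str.slice line (some 4) none)), [])
  else
    match st.2.1 with
    | some s => if s ≠ "" then (st.1, st.2.1, st.2.2 ++ [line]) else st
    | none => st

-- A's 'save last section' epilogue
def pvFinishA (st : List (List (String × String)) × Option String × List String) :
    List (List (String × String)) :=
  match st.2.1 with
  | some s =>
    if s ≠ "" then
      st.1 ++ [[("title", s), ("content", PySem.Str.strip (PySem.Str.join "\n" st.2.2))]]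
    else st.1
  | none => st.1

def parse_subsections_py (content : String) : List (List (String × String)) :=
  pvFinishA (((PySem.Str.split? content "\n").getD []).foldl pvStepA ([], none, []))

-- ===== PORT B =====
-- loop body of B: state (result, body), run over reversed(lines); line[4:].strip() is the
-- title, '\n'.join(reversed(body)) the pending content.
def pvStepB (st : List (List (String × String)) × List String) (line : String) :
    List (List (String × String)) × List String :=
  if PySem.Str.startswith line "### " then
    ((if PySem.Str.strip (PySem.Str.slice line (some 4) none) ≠ "" then
        st.1 ++ [[("title", PySem.Str.strip (PySem.Str.slice line (some 4) none)),
                  ("content", PySem.Str.strip (PySem.Str.join "\n" st.2.reverse))]]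
      else st.1), [])
  else (st.1, st.2 ++ [line])

def parse_subsections_py_alt (content : String) : List (List (String × String)) :=
  ((((PySem.Str.split? content "\n").getD []).reverse.foldl pvStepB ([], [])).1).reverse

-- ===== PRECONDITION & SPEC =====
def Spec_parse_subsections_py (content : String) (out : List (List (String × String))) : Prop := out = parse_subsections_py_alt content
instance (content : String) (out : List (List (String × String))) : Decidable (Spec_parse_subsections_py content out) := by unfold Spec_parse_subsections_py; infer_instance

-- ===== CLAIM (what is proved, stated in full; the proofs are below) =====
def Claim_equal_parse_subsections_py : Prop := ∀ (content : String), Dom_parse_subsections_py content → Spec_parse_subsections_py content (parse_subsections_py content)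

-- ===== LEMMAS AND PROOFS =====

-- a section record
def pvMk (t : String) (body : List String) : List (String × String) :=
  [("title", t), ("content", PySem.Str.strip (PySem.Str.join "\n" body))]

-- the section A would save for state (cur, acc), if any
def pvClose (cur : Option String) (acc : List String) : List (List (String × String)) :=
  match cur with
  | some s => if s ≠ "" then [pvMk s acc] else []
  | none => []

-- reference recursion: (sections of ls, body lines of ls before its first header)
def pvBrec : List String → List (List (String × String)) × List String
  | [] => ([], [])
  | l :: ls =>
    if PySem.Str.startswith l "### " then
      ((if PySem.Str.strip (PySem.Str.slice l (some 4) none) ≠ "" then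
          pvMk (PySem.Str.strip (PySem.Str.slice l (some 4) none)) (pvBrec ls).2 :: (pvBrec ls).1
        else (pvBrec ls).1), [])
    else ((pvBrec ls).1, l :: (pvBrec ls).2)

theorem pvFinishA_eq (subs : List (List (String × String))) (cur : Option String)
    (acc : List String) : pvFinishA (subs, cur, acc) = subs ++ pvClose cur acc := by
  rcases cur with _ | s
  · simp [pvFinishA, pvClose]
  · by_cases hs : s = "" <;> simp [pvFinishA, pvClose, pvMk, hs]

theorem pvStepA_pos (subs : List (List (String × String))) (cur : Option String)
    (acc : List String) (l : String) (h : PySem.Str.startswith l "### " = true) :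
    pvStepA (subs, cur, acc) l =
      (subs ++ pvClose cur acc, some (PySem.Str.strip (PySem.Str.slice l (some 4) none)), []) := by
  rcases cur with _ | s
  · simp only [pvStepA]; rw [if_pos h]; simp [pvClose]
  · simp only [pvStepA]; rw [if_pos h]
    by_cases hs : s = "" <;> simp [pvClose, pvMk, hs]

theorem pvStepA_neg (subs : List (List (String × String))) (cur : Option String)
    (acc : List String) (l : String) (h : ¬ PySem.Str.startswith l "### " = true) :
    pvStepA (subs, cur, acc) l =
      (subs, cur,
       match cur with
       | some s => if s ≠ "" then acc ++ [l] else acc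
       | none => acc) := by
  rcases cur with _ | s
  · simp only [pvStepA]; rw [if_neg h]
  · simp only [pvStepA]; rw [if_neg h]
    by_cases hs : s = "" <;> simp [hs]

theorem pvA_fold (ls : List String) :
    ∀ (subs : List (List (String × String))) (cur : Option String) (acc : List String),
      pvFinishA (ls.foldl pvStepA (subs, cur, acc)) =
        subs ++ pvClose cur (acc ++ (pvBrec ls).2) ++ (pvBrec ls).1 := by
  induction ls with
  | nil =>
    intro subs cur acc
    simp [pvFinishA_eq, pvBrec]
  | cons l ls ih =>
    intro subs cur acc
    rw [List.foldl_cons]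
    by_cases h : PySem.Str.startswith l "### " = true
    · rw [pvStepA_pos subs cur acc l h, ih]
      simp only [pvBrec]
      rw [if_pos h]
      rcases cur with _ | s
      · simp; split_ifs with ht <;> simp_all [pvClose]
      · by_cases hs : s = "" <;> simp [pvClose, hs] <;> split_ifs <;> simp_all [pvClose]
    · rw [pvStepA_neg subs cur acc l h, ih]
      simp only [pvBrec]
      rw [if_neg h]
      rcases cur with _ | s
      · simp [pvClose]
      · by_cases hs : s = "" <;> simp [pvClose, hs]

theorem pvB_foldr (ls : List String) :
    ls.foldr (fun x y => pvStepB y x) ([], []) =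
      ((pvBrec ls).1.reverse, (pvBrec ls).2.reverse) := by
  induction ls with
  | nil => simp [pvBrec]
  | cons l ls ih =>
    rw [List.foldr_cons, ih]
    by_cases h : PySem.Str.startswith l "### " = true
    · simp only [pvStepB, pvBrec]
      rw [if_pos h, if_pos h]
      split_ifs <;> simp [pvMk]
    · simp only [pvStepB, pvBrec]
      rw [if_neg h, if_neg h]
      simp

-- ===== VERDICT (by name: the statement is the Claim_ definition above) =====
theorem parse_subsections_py_spec : Claim_equal_parse_subsections_py := by
  intro content _
  show parse_subsections_py content = parse_subsections_py_alt content
  unfold parse_subsections_py parse_subsections_py_alt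
  rw [List.foldl_reverse, pvB_foldr, pvA_fold]
  simp [pvClose]
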